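-- pv_equiv track=rewrite | github.com/WangYoudian/Useful-Toolkit | 求解形如a-b问题/countSameParitySum.py | countSameParitySum
-- ===== SOURCE A (Python) =====
-- def countSameParitySum(b, mean):
--     flag = 0
--     container = []
--     i = 1
--     while flag <= 1:
--         same_parity = []
--         symbol = i%2
--         if i > b:
--             temI, temB = b, i
--         else:
--             temI, temB = i, b
--         # parse the form
--         if temI%2 != symbol:
--             temI += 1
--         for j in range(temI, temB+1, 2):
--             same_parity.append(j)
--         if sum(same_parity)//(len(same_parity)) == mean:
--             container += [i]
--             flag += 1
--         i += 1
--     return container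
-- ===== SOURCE B (Python) =====
-- def countSameParitySum(b, mean):
--     # The same-parity values between min(i, b) and max(i, b) form an arithmetic
--     # sequence with step 2 whose endpoints share a parity, so its integer average
--     # is exactly (first + last) // 2.  Solving (first + last) // 2 == mean for the
--     # endpoint i gives at most four candidates (last endpoint b or b-1 when i <= b,
--     # first endpoint b or b+1 when i > b); the answer is the two smallest.
--     cands = []
--     for last in (b, b - 1):          # last same-parity value <= b (one per parity)
--         c = 2 * mean - last
--         if 1 <= c <= b:
--             cands.append(c)
--     for first in (b, b + 1):         # first same-parity value >= b (one per parity)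
--         c = 2 * mean - first
--         if c >= 1 and c > b:
--             cands.append(c)
--     return sorted(cands)[:2]
-- ===== Notes on version B (the rewrite author's own statement) =====
-- stated objective: faster
-- what changed: A scans i = 1, 2, ... and for each i materialises and sums the whole same-parity range between i and b; B solves (first+last)//2 == mean in closed form (the range average is exactly the endpoint midpoint), yielding at most four candidate i's, and returns the two smallest.
import Mathlib
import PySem

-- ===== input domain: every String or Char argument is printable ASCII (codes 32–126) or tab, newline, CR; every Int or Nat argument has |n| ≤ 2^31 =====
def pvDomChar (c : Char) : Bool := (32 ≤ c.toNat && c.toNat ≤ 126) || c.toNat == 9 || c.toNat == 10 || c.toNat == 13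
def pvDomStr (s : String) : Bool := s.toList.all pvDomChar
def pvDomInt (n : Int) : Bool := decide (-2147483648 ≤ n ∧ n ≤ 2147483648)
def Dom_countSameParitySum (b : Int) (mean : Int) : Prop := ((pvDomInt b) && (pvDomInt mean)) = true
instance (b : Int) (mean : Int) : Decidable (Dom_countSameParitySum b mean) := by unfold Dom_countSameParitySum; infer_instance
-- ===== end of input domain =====

-- B replaces A's unbounded scan (which re-builds and sums a whole range per i) by closed-form
-- arithmetic-sequence averages: at most four candidate i's, returned sorted — faster, and total
-- where A would loop forever (those inputs are outside Pre_).

-- ===== PORT A =====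
-- the loop body's test: builds the same-parity list and compares its floor-average with mean
def pvCondA (b mean i : Int) : Bool :=
  let symbol := PySem.Int.mod i 2
  let p := if i > b then (b, i) else (i, b)
  let temI := if PySem.Int.mod p.1 2 ≠ symbol then p.1 + 1 else p.1
  let same_parity := (PySem.List.pyRange temI (p.2 + 1) 2).foldl (fun acc j => acc ++ [j]) []
  decide (PySem.Int.floordiv same_parity.sum (same_parity.length : Int) = mean)

-- A's 'while flag <= 1' loop; fuel only makes it total (unused fuel outside Pre_)
def pvLoopA (b mean : Int) : Nat → Int → Int → List Int → List Int
  | 0, _, _, container => container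
  | fuel + 1, flag, i, container =>
    if flag ≤ 1 then
      if pvCondA b mean i then
        pvLoopA b mean fuel (flag + 1) (i + 1) (container ++ [i])
      else
        pvLoopA b mean fuel flag (i + 1) container
    else container

def countSameParitySum (b : Int) (mean : Int) : List Int :=
  pvLoopA b mean (2 * mean.natAbs + b.natAbs + 8) 0 1 []

-- ===== PORT B =====
def countSameParitySum_alt (b : Int) (mean : Int) : List Int :=
  let cands := ([b, b - 1] : List Int).foldl (fun acc last =>
      let c := 2 * mean - last
      if 1 ≤ c ∧ c ≤ b then acc ++ [c] else acc) []
  let cands := ([b, b + 1] : List Int).foldl (fun acc first =>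
      let c := 2 * mean - first
      if c ≥ 1 ∧ c > b then acc ++ [c] else acc) cands
  (PySem.List.sorted cands (fun x => x) false).take 2

-- ===== PRECONDITION & SPEC =====
-- the four closed-form candidate solutions of (first+last)//2 == mean (used by Pre_ and the proofs)
def pvCands (b mean : Int) : List Int :=
  (if 1 ≤ 2 * mean - b ∧ 2 * mean - b ≤ b then [2 * mean - b] else []) ++
  (if 1 ≤ 2 * mean - (b - 1) ∧ 2 * mean - (b - 1) ≤ b then [2 * mean - (b - 1)] else []) ++
  (if 2 * mean - b ≥ 1 ∧ 2 * mean - b > b then [2 * mean - b] else []) ++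
  (if 2 * mean - (b + 1) ≥ 1 ∧ 2 * mean - (b + 1) > b then [2 * mean - (b + 1)] else [])

-- Pre_ excludes exactly the inputs with fewer than two solutions, on which A's while loop never
-- terminates (A returns no value there).
def Pre_countSameParitySum (b : Int) (mean : Int) : Prop := 2 ≤ (pvCands b mean).length
instance (b : Int) (mean : Int) : Decidable (Pre_countSameParitySum b mean) := by
  unfold Pre_countSameParitySum; infer_instance

def pvWitness_countSameParitySum : Int × Int := (3, 2)

def Spec_countSameParitySum (b : Int) (mean : Int) (out : List Int) : Prop := out = countSameParitySum_alt b mean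
instance (b : Int) (mean : Int) (out : List Int) : Decidable (Spec_countSameParitySum b mean out) := by unfold Spec_countSameParitySum; infer_instance

-- ===== CLAIM (what is proved, stated in full; the proofs are below) =====
def Claim_equal_countSameParitySum : Prop := ∀ (b : Int) (mean : Int), Dom_countSameParitySum b mean → Pre_countSameParitySum b mean → Spec_countSameParitySum b mean (countSameParitySum b mean)

-- ===== LEMMAS AND PROOFS =====

-- sum over range a, a+2, …: (range N).map (a + 2·) sums to N*a + N*(N-1)
lemma pv_sum_map_affine (a : Int) (N : Nat) :
    (List.map (fun k : Nat => a + 2 * (k : Int)) (List.range N)).sum = N * a + N * ((N : Int) - 1) := by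
  induction N with
  | zero => simp
  | succ n ih =>
    rw [List.range_succ, List.map_append, List.sum_append]
    simp only [List.map_cons, List.map_nil, List.sum_cons, List.sum_nil, ih]
    push_cast
    ring

-- floor-average of the range a, a+2, …, (≤ t) is a + (t-a)/2
lemma pv_avg_pyRange (a t : Int) (hle : a ≤ t) :
    PySem.Int.floordiv (PySem.List.pyRange a (t + 1) 2).sum
      ((PySem.List.pyRange a (t + 1) 2).length : Int) = a + (t - a) / 2 := by
  rw [PySem.List.pyRange_of_pos a (t + 1) (by norm_num)]
  have hlt : a < t + 1 := by omega
  simp only [if_pos hlt]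
  set N : Nat := ((t + 1 - a + 2 - 1) / 2).toNat with hN
  have hNval : (N : Int) = (t - a) / 2 + 1 := by omega
  have hNpos : 0 < (N : Int) := by omega
  rw [pv_sum_map_affine, List.length_map, List.length_range]
  have hsum : (N : Int) * a + (N : Int) * ((N : Int) - 1) = (N : Int) * (a + (N : Int) - 1) := by ring
  rw [hsum, PySem.Int.floordiv_eq_ediv_of_pos hNpos, Int.mul_ediv_cancel_left _ (by omega)]
  omega

-- membership in the candidate list, as arithmetic
lemma pv_mem_cands (b mean x : Int) :
    x ∈ pvCands b mean ↔
      ((1 ≤ 2 * mean - b ∧ 2 * mean - b ≤ b) ∧ x = 2 * mean - b) ∨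
      ((1 ≤ 2 * mean - (b - 1) ∧ 2 * mean - (b - 1) ≤ b) ∧ x = 2 * mean - (b - 1)) ∨
      ((2 * mean - b ≥ 1 ∧ 2 * mean - b > b) ∧ x = 2 * mean - b) ∨
      ((2 * mean - (b + 1) ≥ 1 ∧ 2 * mean - (b + 1) > b) ∧ x = 2 * mean - (b + 1)) := by
  unfold pvCands
  split_ifs <;> simp_all <;> omega

-- the loop test holds exactly on the candidates (for i ≥ 1)
lemma pv_condA_iff (b mean i : Int) (hi : 1 ≤ i) :
    pvCondA b mean i = true ↔ i ∈ pvCands b mean := by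
  unfold pvCondA
  simp only [PySem.List.foldl_append_singleton, List.nil_append]
  rw [PySem.Int.mod_eq_emod_of_pos (a := i) (by norm_num)]
  rw [pv_mem_cands]
  by_cases hib : i > b
  · simp only [if_pos hib]
    rw [PySem.Int.mod_eq_emod_of_pos (a := b) (by norm_num)]
    by_cases hp : b % 2 ≠ i % 2
    · simp only [if_pos hp]
      rw [pv_avg_pyRange (b + 1) i (by omega)]
      simp only [decide_eq_true_eq]
      omega
    · simp only [if_neg hp]
      rw [pv_avg_pyRange b i (by omega)]
      simp only [decide_eq_true_eq]
      omega
  · simp only [if_neg hib]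
    rw [PySem.Int.mod_eq_emod_of_pos (a := i) (by norm_num)]
    simp only [ne_eq, not_true_eq_false, ite_false]
    rw [pv_avg_pyRange i b (by omega)]
    simp only [decide_eq_true_eq]
    omega

-- every candidate is ≥ 1 and < 2|mean| + |b| + 2
lemma pv_cands_bounds (b mean x : Int) (hx : x ∈ pvCands b mean) :
    1 ≤ x ∧ x < 2 * (mean.natAbs : Int) + (b.natAbs : Int) + 2 := by
  rw [pv_mem_cands] at hx
  omega

-- the candidates are pairwise distinct
lemma pv_cands_nodup (b mean : Int) : (pvCands b mean).Nodup := by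
  unfold pvCands
  split_ifs <;> simp_all [List.Nodup] <;> omega

-- the sorted candidate list is strictly increasing
lemma pv_sorted_lt (b mean : Int) :
    (PySem.List.sorted (pvCands b mean) (fun x => x) false).Pairwise (· < ·) := by
  have h1 := PySem.List.sorted_pairwise (pvCands b mean) (fun x => x)
  have h2 : (PySem.List.sorted (pvCands b mean) (fun x => x) false).Nodup :=
    (PySem.List.sorted_perm (pvCands b mean) (fun x => x) false).nodup_iff.mpr (pv_cands_nodup b mean)
  have := h1.and h2
  exact this.imp (by rintro a c ⟨hle, hne⟩; omega)

lemma pv_filter_not_mem {L : List Int} {i : Int} (h : i ∉ L) :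
    L.filter (fun x => decide (i ≤ x)) = L.filter (fun x => decide (i + 1 ≤ x)) := by
  apply List.filter_congr
  intro x hx
  have : x ≠ i := by rintro rfl; exact h hx
  simp only [decide_eq_decide]
  omega

lemma pv_filter_mem : ∀ {L : List Int}, L.Pairwise (· < ·) → ∀ {i : Int}, i ∈ L →
    L.filter (fun x => decide (i ≤ x)) = i :: L.filter (fun x => decide (i + 1 ≤ x)) := by
  intro L
  induction L with
  | nil => intro _ i h; cases h
  | cons y t ih =>
    intro hp i hmem
    have hy := List.pairwise_cons.mp hp
    rcases List.mem_cons.mp hmem with rfl | ht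
    · simp only [List.filter_cons, decide_eq_true_eq]
      rw [if_pos (le_refl i), if_neg (by omega)]
      congr 1
      apply List.filter_congr
      intro x hx
      have := hy.1 x hx
      simp only [decide_eq_decide]
      omega
    · have hyi : y < i := hy.1 i ht
      simp only [List.filter_cons, decide_eq_true_eq]
      rw [if_neg (by omega), if_neg (by omega)]
      exact ih hy.2 ht

-- the fueled loop collects the first k remaining candidates (in increasing order)
lemma pv_loopA_spec (b mean : Int) :
    ∀ (fuel : Nat) (k : Nat) (i : Int) (c : List Int), k ≤ 2 → 1 ≤ i →
      k ≤ ((PySem.List.sorted (pvCands b mean) (fun x => x) false).filter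
            (fun x => decide (i ≤ x))).length →
      (∀ x ∈ PySem.List.sorted (pvCands b mean) (fun x => x) false, x < i + fuel - 1) →
      pvLoopA b mean fuel (2 - (k : Int)) i c =
        c ++ ((PySem.List.sorted (pvCands b mean) (fun x => x) false).filter
              (fun x => decide (i ≤ x))).take k := by
  intro fuel
  set L := PySem.List.sorted (pvCands b mean) (fun x => x) false with hL
  induction fuel with
  | zero =>
    intro k i c hk2 hi hlen hbound
    have hk0 : k = 0 := by
      by_contra hk
      have hpos : 0 < (L.filter (fun x => decide (i ≤ x))).length := by omega
      obtain ⟨x, hxmem⟩ := List.exists_mem_of_length_pos hpos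
      have hxL := List.mem_of_mem_filter hxmem
      have hxi : i ≤ x := by simpa using List.of_mem_filter hxmem
      have := hbound x hxL
      omega
    subst hk0
    simp [pvLoopA]
  | succ fuel ih =>
    intro k i c hk2 hi hlen hbound
    by_cases hk0 : k = 0
    · subst hk0
      simp [pvLoopA]
    · have hflag : (2 - (k : Int)) ≤ 1 := by omega
      rw [pvLoopA, if_pos hflag]
      have hmemiff : pvCondA b mean i = true ↔ i ∈ L := by
        rw [pv_condA_iff b mean i hi, hL, PySem.List.mem_sorted]
      by_cases hm : i ∈ L
      · rw [if_pos (hmemiff.mpr hm)]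
        have hstep : (2 - (k : Int)) + 1 = 2 - ((k - 1 : Nat) : Int) := by
          have : 1 ≤ k := by omega
          push_cast [this]
          ring
        rw [hstep]
        have hfilt := pv_filter_mem (pv_sorted_lt b mean) (hL ▸ hm)
        rw [← hL] at hfilt
        have hlen' : k - 1 ≤ (L.filter (fun x => decide (i + 1 ≤ x))).length := by
          rw [hfilt] at hlen
          simp only [List.length_cons] at hlen
          omega
        rw [ih (k - 1) (i + 1) (c ++ [i]) (by omega) (by omega) hlen'
            (by intro x hx; have := hbound x hx; omega)]
        rw [hfilt]
        have hk1 : k = (k - 1) + 1 := by omega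
        rw [hk1, List.take_succ_cons, List.append_assoc]
        simp
      · rw [if_neg (by simp [hmemiff, hm])]
        have hfilt := pv_filter_not_mem (L := L) (i := i) hm
        rw [ih k (i + 1) c hk2 (by omega) (by rw [← hfilt]; exact hlen)
            (by intro x hx; have := hbound x hx; omega)]
        rw [hfilt]

-- B's foldl-built candidate list is pvCands
lemma pv_alt_eq (b mean : Int) :
    countSameParitySum_alt b mean =
      (PySem.List.sorted (pvCands b mean) (fun x => x) false).take 2 := by
  unfold countSameParitySum_alt pvCands
  simp only [List.foldl_cons, List.foldl_nil]
  split_ifs <;> simp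

-- every element of the sorted candidate list is ≥ 1, so the filter at i = 1 keeps everything
lemma pv_filter_one (b mean : Int) :
    (PySem.List.sorted (pvCands b mean) (fun x => x) false).filter (fun x => decide (1 ≤ x)) =
      PySem.List.sorted (pvCands b mean) (fun x => x) false := by
  apply List.filter_eq_self.mpr
  intro x hx
  have := (pv_cands_bounds b mean x ((PySem.List.mem_sorted _ _ _ _).mp hx)).1
  simpa

-- ===== VERDICT (by name: the statement is the Claim_ definition above) =====
theorem countSameParitySum_spec : Claim_equal_countSameParitySum := by
  intro b mean _hdom hpre
  unfold Spec_countSameParitySum countSameParitySum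
  have h2 : 2 ≤ ((PySem.List.sorted (pvCands b mean) (fun x => x) false).filter
      (fun x => decide ((1 : Int) ≤ x))).length := by
    rw [pv_filter_one b mean,
      (PySem.List.sorted_perm (pvCands b mean) (fun x => x) false).length_eq]
    exact hpre
  have hb : ∀ x ∈ PySem.List.sorted (pvCands b mean) (fun x => x) false,
      x < 1 + ((2 * mean.natAbs + b.natAbs + 8 : Nat) : Int) - 1 := by
    intro x hx
    have := (pv_cands_bounds b mean x ((PySem.List.mem_sorted _ _ _ _).mp hx)).2
    omega
  have hmain := pv_loopA_spec b mean (2 * mean.natAbs + b.natAbs + 8) 2 1 []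
    (le_refl 2) (le_refl 1) h2 hb
  have hflag : (2 : Int) - ((2 : Nat) : Int) = 0 := by norm_num
  rw [hflag] at hmain
  rw [hmain, pv_alt_eq, pv_filter_one b mean]
  simp
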